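-- pv_equiv track=rewrite | github.com/CornellNLP/CS4300_Flask_template | server/app/irsystem/models/search.py | get_exchange
-- ===== SOURCE A (Python) =====
-- def get_exchange(i, transcript, added, result):
--     if i in result:
--         return result[i]
--     elif i in added:
--         # must be a response
--         return get_exchange(transcript[i]['response'], transcript, added, result)
--     else:
--         added.add(i)
--         result[i] = [transcript[i]]
--         return result[i]
-- ===== SOURCE B (Python) =====
-- def get_exchange(i, transcript, added, result):
--     # Two-phase iteration: first resolve the terminal index of the response chain,
--     # then do the single memo lookup-or-insert. Same mutations, same exceptions as A.
--     j = i
--     while j not in result and j in added: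
--         j = transcript[j]['response']
--     if j in result:
--         return result[j]
--     added.add(j)
--     result[j] = [transcript[j]]
--     return result[j]
-- ===== Notes on version B (the rewrite author's own statement) =====
-- stated objective: simpler
-- what changed: Replaces the three-branch tail recursion by a two-phase iteration: a while-loop that only resolves the terminal index of the response chain, then a single memo lookup-or-insert at that index.
import Mathlib
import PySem

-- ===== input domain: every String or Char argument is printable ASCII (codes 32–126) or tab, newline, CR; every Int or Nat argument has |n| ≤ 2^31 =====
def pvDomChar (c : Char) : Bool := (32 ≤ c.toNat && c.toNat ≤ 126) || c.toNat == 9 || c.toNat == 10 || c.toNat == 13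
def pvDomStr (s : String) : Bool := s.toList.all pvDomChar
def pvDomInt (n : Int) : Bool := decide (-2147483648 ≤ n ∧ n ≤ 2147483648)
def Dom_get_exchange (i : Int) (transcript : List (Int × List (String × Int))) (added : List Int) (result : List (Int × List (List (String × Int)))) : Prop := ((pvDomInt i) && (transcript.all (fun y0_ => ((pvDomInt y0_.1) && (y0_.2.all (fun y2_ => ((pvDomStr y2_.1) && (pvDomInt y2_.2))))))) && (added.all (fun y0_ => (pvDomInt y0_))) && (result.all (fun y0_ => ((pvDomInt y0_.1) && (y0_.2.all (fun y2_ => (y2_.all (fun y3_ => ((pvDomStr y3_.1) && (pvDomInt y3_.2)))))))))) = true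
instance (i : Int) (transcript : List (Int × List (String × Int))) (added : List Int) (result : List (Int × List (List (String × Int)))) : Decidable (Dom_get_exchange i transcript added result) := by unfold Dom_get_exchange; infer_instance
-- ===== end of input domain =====

-- B resolves the terminal index of the response chain with a while-loop first, then does one memo
-- lookup-or-insert there; A interleaves both in a three-branch tail recursion. Equivalence proved is about
-- the RETURN value only (both Pythons perform the identical mutations of `added` and `result`).
-- The fuel (added.length + 1) in both ports is exact on Pre_: every chain hop passes through a distinct
-- member of `added` (a repeat means A loops forever, which Pre_ excludes).

-- ===== PORT A =====
-- A's tail recursion, branch for branch; fuel only guards the recursive `elif` hop.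
def goA (transcript : List (Int × List (String × Int))) : Nat → Int → List Int → List (Int × List (List (String × Int))) → List (List (String × Int))
  | 0, _, _, _ => []                                -- fuel guard (unreachable under Pre_)
  | Nat.succ f, i, added, result =>
    match (PySem.Dict.mk result).get? i with
    | some v => v                                   -- if i in result: return result[i]
    | none =>
      if added.contains i then                      -- elif i in added:
        match (PySem.Dict.mk transcript).get? i with
        | some d =>
          match (PySem.Dict.mk d).get? "response" with
          | some j => goA transcript f j added result   -- return get_exchange(transcript[i]['response'], …)
          | none => []                              -- KeyError in Python (excluded by Pre_)
        | none => []                                -- KeyError in Python (excluded by Pre_)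
      else
        match (PySem.Dict.mk transcript).get? i with
        | some d => [d]                             -- result[i] = [transcript[i]]; return result[i]
        | none => []                                -- KeyError in Python (excluded by Pre_)

def get_exchange (i : Int) (transcript : List (Int × List (String × Int))) (added : List Int) (result : List (Int × List (List (String × Int)))) : List (List (String × Int)) :=
  goA transcript (added.length + 1) i added result

-- ===== PORT B =====
-- Phase 1 of Source B: the `while j not in result and j in added` loop; returns the terminal index
-- (none = KeyError or fuel exhausted, both outside Pre_).
def followB (transcript : List (Int × List (String × Int))) (added : List Int) (result : List (Int × List (List (String × Int)))) : Nat → Int → Option Int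
  | 0, _ => none
  | Nat.succ f, j =>
    if !(PySem.Dict.mk result).contains j && added.contains j then
      match ((PySem.Dict.mk transcript).get? j).bind (fun d => (PySem.Dict.mk d).get? "response") with
      | some k => followB transcript added result f k    -- j = transcript[j]['response']
      | none => none                                -- KeyError in Python (excluded by Pre_)
    else some j

-- Phase 2 of Source B: the straight-line lookup-or-insert after the loop.
def finishB (transcript : List (Int × List (String × Int))) (result : List (Int × List (List (String × Int)))) : Option Int → List (List (String × Int))
  | none => []                                      -- unreachable under Pre_
  | some j =>
    match (PySem.Dict.mk result).get? j with
    | some v => v                                   -- if j in result: return result[j]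
    | none =>
      match (PySem.Dict.mk transcript).get? j with
      | some d => [d]                               -- result[j] = [transcript[j]]; return result[j]
      | none => []                                  -- KeyError in Python (excluded by Pre_)

def get_exchange_alt (i : Int) (transcript : List (Int × List (String × Int))) (added : List Int) (result : List (Int × List (List (String × Int)))) : List (List (String × Int)) :=
  finishB transcript result (followB transcript added result (added.length + 1) i)

-- ===== PRECONDITION & SPEC =====
-- pvExit j: the chain stops at j (j is memoized in result, or fresh and present in transcript).
def pvExit (transcript : List (Int × List (String × Int))) (added : List Int) (result : List (Int × List (List (String × Int)))) (j : Int) : Bool :=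
  (PySem.Dict.mk result).contains j || (!(added.contains j) && (PySem.Dict.mk transcript).contains j)

-- pvStep: the response-pointer map of the input data — one hop where the data defines one
-- (j pending in `added` with a 'response' entry), the identity elsewhere.
def pvStep (transcript : List (Int × List (String × Int))) (added : List Int) (result : List (Int × List (List (String × Int)))) (j : Int) : Int :=
  if !(PySem.Dict.mk result).contains j && added.contains j then
    ((((PySem.Dict.mk transcript).get? j).bind (fun d => (PySem.Dict.mk d).get? "response")).getD j)
  else j

-- Pre_ = exactly the inputs on which A returns: a stopping index is reachable from i along the data's
-- response pointers within |added| hops (hops pass through distinct members of `added`; a repeat means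
-- A loops forever, so the bound loses nothing). Excluded inputs are exactly those where A diverges on a
-- pointer cycle or raises KeyError.
def Pre_get_exchange (i : Int) (transcript : List (Int × List (String × Int))) (added : List Int) (result : List (Int × List (List (String × Int)))) : Prop :=
  ∃ n ≤ added.length, pvExit transcript added result ((pvStep transcript added result)^[n] i) = true
instance (i : Int) (transcript : List (Int × List (String × Int))) (added : List Int) (result : List (Int × List (List (String × Int)))) : Decidable (Pre_get_exchange i transcript added result) := by unfold Pre_get_exchange; infer_instance

def pvWitness_get_exchange : Int × (List (Int × List (String × Int))) × List Int × (List (Int × List (List (String × Int)))) :=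
  (1, [(1, [("response", 2)]), (2, [("a", 0)])], [1], [])

def Spec_get_exchange (i : Int) (transcript : List (Int × List (String × Int))) (added : List Int) (result : List (Int × List (List (String × Int)))) (out : List (List (String × Int))) : Prop := out = get_exchange_alt i transcript added result
instance (i : Int) (transcript : List (Int × List (String × Int))) (added : List Int) (result : List (Int × List (List (String × Int)))) (out : List (List (String × Int))) : Decidable (Spec_get_exchange i transcript added result out) := by unfold Spec_get_exchange; infer_instance

-- ===== CLAIM =====
def Claim_equal_get_exchange : Prop := ∀ (i : Int) (transcript : List (Int × List (String × Int))) (added : List Int) (result : List (Int × List (List (String × Int)))), Dom_get_exchange i transcript added result → Pre_get_exchange i transcript added result → Spec_get_exchange i transcript added result (get_exchange i transcript added result)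

-- ===== LEMMAS AND PROOFS =====
theorem exit_case
    (transcript : List (Int × List (String × Int))) (added : List Int) (result : List (Int × List (List (String × Int))))
    (j : Int) (F G : Nat) (hs : pvExit transcript added result j = true) (hF : 0 < F) (hG : 0 < G) :
    goA transcript F j added result = finishB transcript result (followB transcript added result G j) := by
  obtain ⟨f, rfl⟩ := Nat.exists_eq_succ_of_ne_zero (Nat.pos_iff_ne_zero.mp hF)
  obtain ⟨g, rfl⟩ := Nat.exists_eq_succ_of_ne_zero (Nat.pos_iff_ne_zero.mp hG)
  simp only [pvExit, Bool.or_eq_true, Bool.and_eq_true, Bool.not_eq_true'] at hs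
  cases hres : (PySem.Dict.mk result).get? j with
  | some v =>
    have hc : (PySem.Dict.mk result).contains j = true := by
      rw [PySem.Dict.contains_eq_isSome_get?, hres]; rfl
    simp [goA, followB, finishB, hres, hc]
  | none =>
    have hc : (PySem.Dict.mk result).contains j = false :=
      (PySem.Dict.get?_eq_none_iff_contains _ _).mp hres
    rcases hs with h | ⟨ha, ht⟩
    · rw [hc] at h; cases h
    · cases htr : (PySem.Dict.mk transcript).get? j with
      | none =>
        rw [(PySem.Dict.get?_eq_none_iff_contains _ _).mp htr] at ht; cases ht
      | some d =>
        have ha2 : j ∉ added := by simpa using ha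
        simp [goA, followB, finishB, hres, hc, ha2, htr]

theorem goA_eq_finishB_followB
    (transcript : List (Int × List (String × Int))) (added : List Int) (result : List (Int × List (List (String × Int)))) :
    ∀ (n : Nat) (j : Int) (F G : Nat),
      pvExit transcript added result ((pvStep transcript added result)^[n] j) = true → n < F → n < G →
      goA transcript F j added result = finishB transcript result (followB transcript added result G j) := by
  intro n
  induction n with
  | zero =>
    intro j F G hs hF hG
    exact exit_case transcript added result j F G (by simpa using hs) hF hG
  | succ n ih =>
    intro j F G hs hF hG
    by_cases hex : pvExit transcript added result j = true
    · exact exit_case transcript added result j F G hex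
        (Nat.lt_of_le_of_lt (Nat.zero_le _) hF) (Nat.lt_of_le_of_lt (Nat.zero_le _) hG)
    · -- j is not a stopping index
      have hc : (PySem.Dict.mk result).contains j = false := by
        rcases h : (PySem.Dict.mk result).contains j with _ | _
        · rfl
        · exact absurd (by simp [pvExit, h]) hex
      have hres : (PySem.Dict.mk result).get? j = none :=
        (PySem.Dict.get?_eq_none_iff_contains _ _).mpr hc
      by_cases ha : added.contains j = true
      · have ham : j ∈ added := by simpa using ha
        cases hnx : ((PySem.Dict.mk transcript).get? j).bind (fun d => (PySem.Dict.mk d).get? "response") with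
        | none =>
          -- mid-chain KeyError: j is a fixpoint of pvStep and not a stopping index, contradicting hs
          have hfix : pvStep transcript added result j = j := by
            simp [pvStep, hc, ham, hnx]
          rw [Function.iterate_succ_apply, hfix, Function.iterate_fixed hfix] at hs
          exact absurd hs hex
        | some k =>
          have hstep : pvStep transcript added result j = k := by
            simp [pvStep, hc, ham, hnx]
          rw [Function.iterate_succ_apply, hstep] at hs
          obtain ⟨f, rfl⟩ := Nat.exists_eq_succ_of_ne_zero
            (Nat.pos_iff_ne_zero.mp (Nat.lt_of_le_of_lt (Nat.zero_le _) hF))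
          obtain ⟨g, rfl⟩ := Nat.exists_eq_succ_of_ne_zero
            (Nat.pos_iff_ne_zero.mp (Nat.lt_of_le_of_lt (Nat.zero_le _) hG))
          cases htr : (PySem.Dict.mk transcript).get? j with
          | none => rw [htr] at hnx; cases hnx
          | some d =>
            rw [htr] at hnx
            simp only [Option.bind_some] at hnx
            have ha2 : j ∈ added := by simpa using ha
            have hA : goA transcript (f+1) j added result = goA transcript f k added result := by
              simp [goA, hres, ha2, htr, hnx]
            have hB : followB transcript added result (g+1) j = followB transcript added result g k := by
              simp [followB, hc, ha2, htr, hnx]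
            rw [hA, hB]
            exact ih k f g hs (Nat.lt_of_succ_lt_succ hF) (Nat.lt_of_succ_lt_succ hG)
      · -- j not pending and not a stopping index: pvStep fixes it, contradicting hs
        have ha2 : j ∉ added := by simpa using ha
        have hfix : pvStep transcript added result j = j := by
          simp [pvStep, ha2]
        rw [Function.iterate_succ_apply, hfix, Function.iterate_fixed hfix] at hs
        exact absurd hs hex

-- ===== VERDICT =====
theorem get_exchange_spec : Claim_equal_get_exchange := by
  intro i transcript added result _ hpre
  obtain ⟨n, hn, hs⟩ := hpre
  exact goA_eq_finishB_followB transcript added result n i _ _ hs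
    (Nat.lt_succ_of_le hn) (Nat.lt_succ_of_le hn)
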